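-- pv_equiv track=rewrite | github.com/Nikakaka/TradingAgents | tradingagents/web_server.py | _pick_preferred_model
-- ===== SOURCE A (Python) =====
-- from typing import Any, Dict, List
--
-- def _pick_preferred_model(models: List[str], preferred_names: List[str]) -> str:
--     if not models:
--         return ""
--
--     lowered = [(model, model.lower()) for model in models]
--     for preferred in preferred_names:
--         preferred_lower = preferred.lower()
--         for model, model_lower in lowered:
--             if model_lower == preferred_lower:
--                 return model
--         for model, model_lower in lowered:
--             if preferred_lower in model_lower:
--                 return model
--     return models[0]
-- ===== SOURCE B (Python) =====
-- def _pick_preferred_model(models, preferred_names):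
--     if not models:
--         return ""
--     prefs = [p.lower() for p in preferred_names]
--     no_match = (len(prefs), 0)
--
--     def key(model):
--         ml = model.lower()
--         for j, p in enumerate(prefs):
--             if ml == p:
--                 return (j, 0)  # exact match on the j-th preferred name
--             if p in ml:
--                 return (j, 1)  # substring match on the j-th preferred name
--         return no_match
--
--     best = models[0]
--     best_key = key(best)
--     for m in models[1:]:
--         k = key(m)
--         if k < best_key:
--             best, best_key = m, k
--     return best
-- ===== Notes on version B (the rewrite author's own statement) =====
-- stated objective: alternative
-- what changed: Replaces the per-preferred-name exact-then-substring rescans of the model list with a single argmin pass: each model gets one priority key (preferred index, match type) computed once, and the earliest model with the lexicographically smallest key is selected.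
import Mathlib
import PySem

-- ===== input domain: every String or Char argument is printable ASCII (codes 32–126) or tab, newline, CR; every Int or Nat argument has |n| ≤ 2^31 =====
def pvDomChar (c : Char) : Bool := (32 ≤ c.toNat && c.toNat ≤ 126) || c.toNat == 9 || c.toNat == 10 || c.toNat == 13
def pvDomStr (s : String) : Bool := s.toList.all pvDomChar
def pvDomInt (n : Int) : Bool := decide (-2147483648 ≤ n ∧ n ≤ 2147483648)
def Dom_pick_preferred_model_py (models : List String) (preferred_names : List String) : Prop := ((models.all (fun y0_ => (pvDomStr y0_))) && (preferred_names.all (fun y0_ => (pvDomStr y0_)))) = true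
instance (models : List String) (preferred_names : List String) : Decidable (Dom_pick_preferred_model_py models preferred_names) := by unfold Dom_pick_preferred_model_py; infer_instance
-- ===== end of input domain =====

-- B replaces A's repeated exact-then-substring scans with a single argmin pass over per-model
-- priority keys (alternative decomposition, same asymptotic cost).

-- ===== PORT A =====
-- first model whose lowered form equals pl
def pvScanExact (lowered : List (String × String)) (pl : String) : Option String :=
  match lowered with
  | [] => none
  | (m, ml) :: t => if ml = pl then some m else pvScanExact t pl

-- first model whose lowered form contains pl
def pvScanSub (lowered : List (String × String)) (pl : String) : Option String :=
  match lowered with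
  | [] => none
  | (m, ml) :: t => if PySem.Str.isIn pl ml then some m else pvScanSub t pl

-- the 'for preferred in preferred_names' loop of A
def pvPrefLoop (lowered : List (String × String)) (prefs : List String) : Option String :=
  match prefs with
  | [] => none
  | p :: rest =>
    let pl := PySem.Str.lower p
    match pvScanExact lowered pl with
    | some m => some m
    | none =>
      match pvScanSub lowered pl with
      | some m => some m
      | none => pvPrefLoop lowered rest

def pick_preferred_model_py (models : List String) (preferred_names : List String) : String :=
  match models with
  | [] => ""
  | m0 :: _ =>
    let lowered := models.map (fun m => (m, PySem.Str.lower m))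
    (pvPrefLoop lowered preferred_names).getD m0

-- ===== PORT B =====
-- B's key(model): (j,0) for the first exact hit, (j,1) for the first containment hit, noMatch otherwise
def pvKeyB (prefsL : List String) (j : Nat) (ml : String) (noMatch : Nat × Nat) : Nat × Nat :=
  match prefsL with
  | [] => noMatch
  | p :: rest =>
    if ml = p then (j, 0)
    else if PySem.Str.isIn p ml then (j, 1)
    else pvKeyB rest (j + 1) ml noMatch

-- Python's '<' on the Nat×Nat keys (lexicographic)
def pvLtB (a b : Nat × Nat) : Bool := a.1 < b.1 || (a.1 == b.1 && a.2 < b.2)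

-- B's 'for m in models[1:]' argmin loop (strict improvement keeps the earliest minimum)
def pvMinLoop (prefsL : List String) (noMatch : Nat × Nat) (ms : List String) (best : String) (bestKey : Nat × Nat) : String :=
  match ms with
  | [] => best
  | m :: t =>
    let k := pvKeyB prefsL 0 (PySem.Str.lower m) noMatch
    if pvLtB k bestKey then pvMinLoop prefsL noMatch t m k
    else pvMinLoop prefsL noMatch t best bestKey

def pick_preferred_model_py_alt (models : List String) (preferred_names : List String) : String :=
  match models with
  | [] => ""
  | m0 :: rest =>
    let prefsL := preferred_names.map PySem.Str.lower
    let noMatch := (prefsL.length, 0)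
    pvMinLoop prefsL noMatch rest m0 (pvKeyB prefsL 0 (PySem.Str.lower m0) noMatch)

-- ===== PRECONDITION & SPEC =====
def Spec_pick_preferred_model_py (models : List String) (preferred_names : List String) (out : String) : Prop := out = pick_preferred_model_py_alt models preferred_names
instance (models : List String) (preferred_names : List String) (out : String) : Decidable (Spec_pick_preferred_model_py models preferred_names out) := by unfold Spec_pick_preferred_model_py; infer_instance

-- ===== CLAIM (what is proved, stated in full; the proofs are below) =====
def Claim_equal_pick_preferred_model_py : Prop := ∀ (models : List String) (preferred_names : List String), Dom_pick_preferred_model_py models preferred_names → Spec_pick_preferred_model_py models preferred_names (pick_preferred_model_py models preferred_names)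

-- ===== LEMMAS AND PROOFS =====

-- the key of a model with respect to the (unlowered) preferred names
def pvKeyOf (prefs : List String) (m : String) : Nat × Nat :=
  pvKeyB (prefs.map PySem.Str.lower) 0 (PySem.Str.lower m) ((prefs.map PySem.Str.lower).length, 0)

-- first element of the list whose key is lexicographically ≤ every later key (= first argmin)
def pvFArg (key : String → Nat × Nat) : List String → String → String
  | [], d => d
  | m :: t, d => if t.all (fun x => ! pvLtB (key x) (key m)) then m else pvFArg key t d

lemma pvLtB_iff (a b : Nat × Nat) : pvLtB a b = true ↔ a.1 < b.1 ∨ (a.1 = b.1 ∧ a.2 < b.2) := by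
  simp [pvLtB]

lemma pvLtB_bot (k : Nat × Nat) : pvLtB k (0, 0) = false := by
  rw [Bool.eq_false_iff]; intro h; rw [pvLtB_iff] at h; omega

lemma pvLtB_bot_lt (k : Nat × Nat) (h : k ≠ (0, 0)) : pvLtB (0, 0) k = true := by
  rw [pvLtB_iff]; simp only
  rcases k with ⟨k1, k2⟩
  by_contra hc
  exact h (by simp at hc ⊢; omega)

lemma pvLtB_trans_like {x m b : Nat × Nat} (h1 : pvLtB x b = true) (h2 : pvLtB m b = false) :
    pvLtB x m = true := by
  rw [pvLtB_iff] at h1 ⊢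
  have h2' : ¬ (m.1 < b.1 ∨ (m.1 = b.1 ∧ m.2 < b.2)) := fun hc => by
    rw [(pvLtB_iff m b).mpr hc] at h2; simp at h2
  push_neg at h2'
  omega

lemma pvKeyB_cons_exact {p : String} {ml : String} (rest : List String) (j : Nat) (nm : Nat × Nat)
    (h : ml = p) : pvKeyB (p :: rest) j ml nm = (j, 0) := by
  simp only [pvKeyB]; rw [if_pos h]

lemma pvKeyB_cons_sub {p : String} {ml : String} (rest : List String) (j : Nat) (nm : Nat × Nat)
    (h1 : ¬ ml = p) (h2 : PySem.Str.isIn p ml = true) : pvKeyB (p :: rest) j ml nm = (j, 1) := by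
  simp only [pvKeyB]; rw [if_neg h1, if_pos h2]

lemma pvKeyB_cons_rec {p : String} {ml : String} (rest : List String) (j : Nat) (nm : Nat × Nat)
    (h1 : ¬ ml = p) (h2 : PySem.Str.isIn p ml = false) :
    pvKeyB (p :: rest) j ml nm = pvKeyB rest (j + 1) ml nm := by
  simp only [pvKeyB]
  rw [if_neg h1, if_neg (by rw [h2]; exact Bool.false_ne_true)]

-- shift lemma: starting the index one later adds one to the first component
lemma pvKeyB_shift (l : List String) : ∀ (j c : Nat) (ml : String),
    pvKeyB l (j + 1) ml (c + 1, 0) = ((pvKeyB l j ml (c, 0)).1 + 1, (pvKeyB l j ml (c, 0)).2) := by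
  induction l with
  | nil => intro j c ml; simp [pvKeyB]
  | cons p rest ih =>
    intro j c ml
    by_cases h1 : ml = p
    · rw [pvKeyB_cons_exact rest _ _ h1, pvKeyB_cons_exact rest _ _ h1]
    · cases h2 : PySem.Str.isIn p ml with
      | true => rw [pvKeyB_cons_sub rest _ _ h1 h2, pvKeyB_cons_sub rest _ _ h1 h2]
      | false =>
        rw [pvKeyB_cons_rec rest _ _ h1 h2, pvKeyB_cons_rec rest _ _ h1 h2]
        exact ih (j + 1) c ml

lemma pvKeyB_shift_fst_pos (l : List String) (c : Nat) (ml : String) :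
    1 ≤ (pvKeyB l 1 ml (c + 1, 0)).1 := by
  have := pvKeyB_shift l 0 c ml
  rw [this]; omega

-- key = (0,0) forces an exact match on the first preferred name
lemma pvKey_eq_bot_iff (pl : String) (restL : List String) (ml : String) :
    pvKeyB (pl :: restL) 0 ml (restL.length + 1, 0) = (0, 0) ↔ ml = pl := by
  constructor
  · intro h
    by_contra h1
    cases h2 : PySem.Str.isIn pl ml with
    | true => rw [pvKeyB_cons_sub restL _ _ h1 h2] at h; simp at h
    | false =>
      rw [pvKeyB_cons_rec restL _ _ h1 h2] at h
      have := pvKeyB_shift_fst_pos restL restL.length ml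
      rw [h] at this; omega
  · intro h; rw [pvKeyB_cons_exact restL _ _ h]

-- scan characterizations
lemma pvScanExact_some (pl : String) : ∀ (ms : List String) (r : String),
    pvScanExact (ms.map fun m => (m, PySem.Str.lower m)) pl = some r →
    ∃ pre post, ms = pre ++ r :: post ∧ PySem.Str.lower r = pl ∧
      ∀ x ∈ pre, PySem.Str.lower x ≠ pl := by
  intro ms
  induction ms with
  | nil => intro r h; simp [pvScanExact] at h
  | cons m t ih =>
    intro r h
    by_cases h1 : PySem.Str.lower m = pl
    · simp [pvScanExact, h1] at h
      exact ⟨[], t, by simp [h], by rw [h] at h1; exact h1, by simp⟩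
    · simp only [List.map_cons, pvScanExact, if_neg h1] at h
      obtain ⟨pre, post, he, hr, hpre⟩ := ih r h
      exact ⟨m :: pre, post, by simp [he], hr, by
        intro x hx; rcases List.mem_cons.mp hx with h' | h'
        · rw [h']; exact h1
        · exact hpre x h'⟩

lemma pvScanExact_none (pl : String) : ∀ (ms : List String),
    pvScanExact (ms.map fun m => (m, PySem.Str.lower m)) pl = none →
    ∀ x ∈ ms, PySem.Str.lower x ≠ pl := by
  intro ms
  induction ms with
  | nil => intro _ x hx; simp at hx
  | cons m t ih =>
    intro h x hx
    by_cases h1 : PySem.Str.lower m = pl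
    · simp [pvScanExact, h1] at h
    · simp only [List.map_cons, pvScanExact, if_neg h1] at h
      rcases List.mem_cons.mp hx with h' | h'
      · rw [h']; exact h1
      · exact ih h x h'

lemma pvScanSub_some (pl : String) : ∀ (ms : List String) (r : String),
    pvScanSub (ms.map fun m => (m, PySem.Str.lower m)) pl = some r →
    ∃ pre post, ms = pre ++ r :: post ∧ PySem.Str.isIn pl (PySem.Str.lower r) = true ∧
      ∀ x ∈ pre, PySem.Str.isIn pl (PySem.Str.lower x) = false := by
  intro ms
  induction ms with
  | nil => intro r h; simp [pvScanSub] at h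
  | cons m t ih =>
    intro r h
    by_cases h1 : PySem.Str.isIn pl (PySem.Str.lower m) = true
    · simp only [List.map_cons, pvScanSub, if_pos h1, Option.some.injEq] at h
      exact ⟨[], t, by simp [h], by rw [← h]; exact h1, by simp⟩
    · simp only [List.map_cons, pvScanSub, if_neg h1] at h
      obtain ⟨pre, post, he, hr, hpre⟩ := ih r h
      exact ⟨m :: pre, post, by simp [he], hr, by
        intro x hx; rcases List.mem_cons.mp hx with h' | h'
        · rw [h']; exact Bool.eq_false_iff.mpr h1
        · exact hpre x h'⟩

lemma pvScanSub_none (pl : String) : ∀ (ms : List String),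
    pvScanSub (ms.map fun m => (m, PySem.Str.lower m)) pl = none →
    ∀ x ∈ ms, PySem.Str.isIn pl (PySem.Str.lower x) = false := by
  intro ms
  induction ms with
  | nil => intro _ x hx; simp at hx
  | cons m t ih =>
    intro h x hx
    by_cases h1 : PySem.Str.isIn pl (PySem.Str.lower m) = true
    · simp only [List.map_cons, pvScanSub, if_pos h1] at h
      exact absurd h (by simp)
    · simp only [List.map_cons, pvScanSub, if_neg h1] at h
      rcases List.mem_cons.mp hx with h' | h'
      · rw [h']; exact Bool.eq_false_iff.mpr h1
      · exact ih h x h'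

-- pvFArg picks the marked element of a split whose key beats everything before and is not beaten after
lemma pvFArg_split (key : String → Nat × Nat) (k0 : Nat × Nat) :
    ∀ (pre : List String) (r : String) (post : List String) (d : String),
    key r = k0 → (∀ x ∈ pre, pvLtB k0 (key x) = true) → (∀ x ∈ post, pvLtB (key x) k0 = false) →
    pvFArg key (pre ++ r :: post) d = r := by
  intro pre
  induction pre with
  | nil =>
    intro r post d hk _ hpost
    simp only [List.nil_append, pvFArg]
    rw [if_pos]
    rw [List.all_eq_true]
    intro x hx
    simp [hk, hpost x hx]
  | cons y pre' ih =>
    intro r post d hk hpre hpost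
    simp only [List.cons_append, pvFArg]
    rw [if_neg]
    · exact ih r post d hk (fun x hx => hpre x (List.mem_cons_of_mem y hx)) hpost
    · rw [List.all_eq_true]
      push_neg
      refine ⟨r, by simp, ?_⟩
      have : pvLtB (key r) (key y) = true := by
        rw [hk]; exact hpre y (List.mem_cons_self ..)
      simp [this]

-- when no key in the list beats the head's key, the head is picked
lemma pvFArg_head (key : String → Nat × Nat) (m : String) (t : List String) (d : String)
    (h : ∀ x ∈ t, pvLtB (key x) (key m) = false) : pvFArg key (m :: t) d = m := by
  simp only [pvFArg]
  rw [if_pos]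
  rw [List.all_eq_true]
  intro x hx; simp [h x hx]

-- boolean all only depends on the values on members
lemma pvAll_congr {α : Type} (l : List α) (f g : α → Bool) (h : ∀ x ∈ l, f x = g x) :
    l.all f = l.all g := by
  induction l with
  | nil => rfl
  | cons a t ih =>
    simp only [List.all_cons]
    rw [h a (List.mem_cons_self ..), ih (fun x hx => h x (List.mem_cons_of_mem a hx))]

-- dropping the head when some later element strictly beats it
lemma pvFArg_cons_skip (key : String → Nat × Nat) (b : String) (ms : List String) (d : String)
    (hx : ∃ x ∈ ms, pvLtB (key x) (key b) = true) : pvFArg key (b :: ms) d = pvFArg key ms d := by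
  have hall : (ms.all fun x => ! pvLtB (key x) (key b)) = false := by
    obtain ⟨x, hx, hb⟩ := hx
    rw [List.all_eq_false]
    exact ⟨x, hx, by simp [hb]⟩
  show (if (ms.all fun x => ! pvLtB (key x) (key b)) = true then b else pvFArg key ms d) = _
  rw [hall]
  simp

-- pvFArg only depends on the pairwise comparisons of keys of list members
lemma pvFArg_congr (key key' : String → Nat × Nat) :
    ∀ (ms : List String) (d : String),
    (∀ x ∈ ms, ∀ y ∈ ms, pvLtB (key x) (key y) = pvLtB (key' x) (key' y)) →
    pvFArg key ms d = pvFArg key' ms d := by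
  intro ms
  induction ms with
  | nil => intro d _; rfl
  | cons m t ih =>
    intro d h
    have hall : (t.all fun x => ! pvLtB (key x) (key m)) = (t.all fun x => ! pvLtB (key' x) (key' m)) := by
      apply pvAll_congr
      intro x hx
      rw [h x (List.mem_cons_of_mem m hx) m (List.mem_cons_self ..)]
    simp only [pvFArg]
    rw [hall]
    by_cases hc : (t.all fun x => ! pvLtB (key' x) (key' m)) = true
    · rw [if_pos hc, if_pos hc]
    · rw [if_neg hc, if_neg hc]
      exact ih d (fun x hx y hy => h x (List.mem_cons_of_mem m hx) y (List.mem_cons_of_mem m hy))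

-- B's argmin loop computes pvFArg
lemma pvMinLoop_eq_fArg (prefsL : List String) (nm : Nat × Nat) (d : String) :
    ∀ (ms : List String) (b : String),
    pvMinLoop prefsL nm ms b (pvKeyB prefsL 0 (PySem.Str.lower b) nm) =
      pvFArg (fun m => pvKeyB prefsL 0 (PySem.Str.lower m) nm) (b :: ms) d := by
  intro ms
  induction ms with
  | nil => intro b; simp [pvMinLoop, pvFArg]
  | cons m t ih =>
    intro b
    set key := fun m => pvKeyB prefsL 0 (PySem.Str.lower m) nm with hkey
    by_cases hlt : pvLtB (key m) (key b) = true
    · have hLHS : pvMinLoop prefsL nm (m :: t) b (key b) = pvMinLoop prefsL nm t m (key m) := by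
        simp only [pvMinLoop]; rw [if_pos hlt]
      rw [hLHS, ih m, pvFArg_cons_skip key b (m :: t) d ⟨m, List.mem_cons_self .., hlt⟩]
    · rw [Bool.not_eq_true] at hlt
      have hm : pvKeyB prefsL 0 (PySem.Str.lower m) nm = key m := rfl
      have hLHS : pvMinLoop prefsL nm (m :: t) b (key b) = pvMinLoop prefsL nm t b (key b) := by
        simp only [pvMinLoop]; rw [if_neg (by rw [hm, hlt]; exact Bool.false_ne_true)]
      rw [hLHS, ih b]
      by_cases hall : (t.all fun x => ! pvLtB (key x) (key b)) = true
      · have ht : ∀ x ∈ t, pvLtB (key x) (key b) = false := by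
          intro x hx
          have := List.all_eq_true.mp hall x hx
          simpa using this
        rw [pvFArg_head key b t d ht]
        rw [pvFArg_head key b (m :: t) d]
        intro x hx
        rcases List.mem_cons.mp hx with h' | h'
        · rw [h']; exact hlt
        · exact ht x h'
      · rw [Bool.not_eq_true, List.all_eq_false] at hall
        obtain ⟨x, hx, hb0⟩ := hall
        have hb : pvLtB (key x) (key b) = true := by simpa using hb0
        rw [pvFArg_cons_skip key b t d ⟨x, hx, hb⟩,
          pvFArg_cons_skip key b (m :: t) d ⟨x, List.mem_cons_of_mem m hx, hb⟩,
          pvFArg_cons_skip key m t d ⟨x, hx, pvLtB_trans_like hb hlt⟩]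

lemma pvLtB_shift (a b : Nat × Nat) : pvLtB (a.1 + 1, a.2) (b.1 + 1, b.2) = pvLtB a b := by
  by_cases h : pvLtB a b = true
  · rw [h, (pvLtB_iff _ _).mpr]
    have h' := (pvLtB_iff a b).mp h
    show a.1 + 1 < b.1 + 1 ∨ (a.1 + 1 = b.1 + 1 ∧ a.2 < b.2)
    omega
  · rw [Bool.not_eq_true] at h
    rw [h, Bool.eq_false_iff]
    intro hc
    have hc' := (pvLtB_iff _ _).mp hc
    have hc'' : a.1 + 1 < b.1 + 1 ∨ (a.1 + 1 = b.1 + 1 ∧ a.2 < b.2) := hc'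
    have hab : pvLtB a b = true := (pvLtB_iff a b).mpr (by omega)
    rw [h] at hab
    exact absurd hab (by simp)

-- A's preferred-names loop computes pvFArg as well (fallback = head of the model list)
lemma pvPrefLoop_eq_fArg : ∀ (prefs : List String) (m0 : String) (rest0 : List String),
    (pvPrefLoop ((m0 :: rest0).map fun m => (m, PySem.Str.lower m)) prefs).getD m0 =
      pvFArg (pvKeyOf prefs) (m0 :: rest0) m0 := by
  intro prefs
  induction prefs with
  | nil =>
    intro m0 rest0
    have hloop : pvPrefLoop ((m0 :: rest0).map fun m => (m, PySem.Str.lower m)) [] = none := rfl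
    rw [hloop]
    rw [pvFArg_head _ m0 rest0 m0 (fun x _ => by simp [pvKeyOf, pvKeyB, pvLtB])]
    rfl
  | cons p rest ih =>
    intro m0 rest0
    set ms := m0 :: rest0 with hms
    set d := m0 with hd
    set pl := PySem.Str.lower p with hpl
    set restL := rest.map PySem.Str.lower with hrestL
    have hkey : ∀ m, pvKeyOf (p :: rest) m = pvKeyB (pl :: restL) 0 (PySem.Str.lower m) (restL.length + 1, 0) := by
      intro m; simp [pvKeyOf, hpl, hrestL]
    cases hse : pvScanExact (ms.map fun m => (m, PySem.Str.lower m)) pl with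
    | some r =>
      have hA : pvPrefLoop (ms.map fun m => (m, PySem.Str.lower m)) (p :: rest) = some r := by
        simp only [pvPrefLoop]; rw [← hpl, hse]
      rw [hA]
      obtain ⟨pre, post, he, hr, hpre⟩ := pvScanExact_some pl ms r hse
      rw [he]
      rw [pvFArg_split (pvKeyOf (p :: rest)) (0, 0) pre r post d]
      · rfl
      · rw [hkey r, pvKey_eq_bot_iff]; exact hr
      · intro x hx
        apply pvLtB_bot_lt
        rw [hkey x]
        intro hc
        exact hpre x hx ((pvKey_eq_bot_iff pl restL _).mp hc)
      · intro x _; exact pvLtB_bot _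
    | none =>
      have hne : ∀ x ∈ ms, PySem.Str.lower x ≠ pl := pvScanExact_none pl ms hse
      cases hss : pvScanSub (ms.map fun m => (m, PySem.Str.lower m)) pl with
      | some r =>
        have hA : pvPrefLoop (ms.map fun m => (m, PySem.Str.lower m)) (p :: rest) = some r := by
          simp only [pvPrefLoop]; rw [← hpl, hse, hss]
        rw [hA]
        obtain ⟨pre, post, he, hr, hpre⟩ := pvScanSub_some pl ms r hss
        have hrmem : r ∈ ms := by rw [he]; exact List.mem_append_right pre (List.mem_cons_self ..)
        rw [he]
        rw [pvFArg_split (pvKeyOf (p :: rest)) (0, 1) pre r post d]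
        · rfl
        · rw [hkey r, pvKeyB_cons_sub restL _ _ (hne r hrmem) hr]
        · intro x hx
          have hxmem : x ∈ ms := by rw [he]; exact List.mem_append_left _ hx
          rw [hkey x, pvKeyB_cons_rec restL _ _ (hne x hxmem) (hpre x hx)]
          rw [pvLtB_iff]
          left
          exact pvKeyB_shift_fst_pos restL restL.length (PySem.Str.lower x)
        · intro x hx
          have hxmem : x ∈ ms := by
            rw [he]; exact List.mem_append_right pre (List.mem_cons_of_mem r hx)
          rw [Bool.eq_false_iff]
          intro hc
          rw [pvLtB_iff] at hc
          norm_num at hc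
          have hb : pvKeyOf (p :: rest) x = (0, 0) := Prod.ext hc.1 (by omega)
          rw [hkey x, pvKey_eq_bot_iff] at hb
          exact hne x hxmem hb
      | none =>
        have hns : ∀ x ∈ ms, PySem.Str.isIn pl (PySem.Str.lower x) = false := pvScanSub_none pl ms hss
        have hA : pvPrefLoop (ms.map fun m => (m, PySem.Str.lower m)) (p :: rest) =
            pvPrefLoop (ms.map fun m => (m, PySem.Str.lower m)) rest := by
          simp only [pvPrefLoop]; rw [← hpl, hse, hss]
        rw [hA, ih m0 rest0]
        apply Eq.symm
        apply pvFArg_congr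
        intro x hx y hy
        have hshift : ∀ z, z ∈ ms → pvKeyOf (p :: rest) z = ((pvKeyOf rest z).1 + 1, (pvKeyOf rest z).2) := by
          intro z hz
          rw [hkey z, pvKeyB_cons_rec restL _ _ (hne z hz) (hns z hz)]
          have := pvKeyB_shift restL 0 restL.length (PySem.Str.lower z)
          rw [this]
          rfl
        rw [hshift x hx, hshift y hy, pvLtB_shift]

-- ===== VERDICT (by name: the statement is the Claim_ definition above) =====
theorem pick_preferred_model_py_spec : Claim_equal_pick_preferred_model_py := by
  intro models preferred_names _
  unfold Spec_pick_preferred_model_py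
  cases models with
  | nil => rfl
  | cons m0 rest =>
    have hA : pick_preferred_model_py (m0 :: rest) preferred_names =
        (pvPrefLoop ((m0 :: rest).map fun m => (m, PySem.Str.lower m)) preferred_names).getD m0 := rfl
    have hB : pick_preferred_model_py_alt (m0 :: rest) preferred_names =
        pvMinLoop (preferred_names.map PySem.Str.lower) ((preferred_names.map PySem.Str.lower).length, 0)
          rest m0 (pvKeyB (preferred_names.map PySem.Str.lower) 0 (PySem.Str.lower m0)
            ((preferred_names.map PySem.Str.lower).length, 0)) := rfl
    rw [hA, hB, pvPrefLoop_eq_fArg preferred_names m0 rest,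
      pvMinLoop_eq_fArg (preferred_names.map PySem.Str.lower)
        ((preferred_names.map PySem.Str.lower).length, 0) m0 rest m0]
    rfl
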